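-- pv_equiv track=rewrite | github.com/EdsonEddy/perfilTesis2 | workspace_thesis/dataset/py-tests-edit/1279/139718/139718.py | mn
-- ===== SOURCE A (Python) =====
-- def mn(x):
-- 	s ='abcdefghijklmnopqrstuvwxyz'
-- 	c = 0
-- 	for i in s:
-- 		if(i==x):
-- 			return c
-- 		c += 1
-- 	return -1
-- ===== SOURCE B (Python) =====
-- def mn(x):
-- 	if isinstance(x, str) and len(x) == 1 and 'a' <= x <= 'z':
-- 		return ord(x) - 97
-- 	return -1
-- ===== Notes on version B (the rewrite author's own statement) =====
-- stated objective: simpler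
-- what changed: Replaces the linear scan over the alphabet with a closed form: a single lowercase letter maps to ord(x)-97, everything else to -1.
import Mathlib
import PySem

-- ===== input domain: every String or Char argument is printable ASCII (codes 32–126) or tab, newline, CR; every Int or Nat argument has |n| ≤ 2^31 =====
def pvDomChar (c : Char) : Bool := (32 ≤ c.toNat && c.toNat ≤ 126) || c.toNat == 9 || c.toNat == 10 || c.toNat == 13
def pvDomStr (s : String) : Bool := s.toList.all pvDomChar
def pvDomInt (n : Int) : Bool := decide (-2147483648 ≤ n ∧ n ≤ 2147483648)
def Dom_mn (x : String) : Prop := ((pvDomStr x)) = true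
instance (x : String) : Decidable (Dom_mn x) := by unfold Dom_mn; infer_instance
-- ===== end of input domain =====

-- B replaces A's linear scan over the alphabet by a closed form (a single lowercase letter maps to ord-97, everything else to -1); objective: simpler.

-- ===== PORT A =====
-- A's for-loop over the alphabet string, counter c, early return when i == x.
def mnGo (letters : List Char) (c : Int) (x : String) : Int :=
  match letters with
  | [] => -1
  | i :: rest => if String.ofList [i] = x then c else mnGo rest (c + 1) x

def mn (x : String) : Int := mnGo "abcdefghijklmnopqrstuvwxyz".toList 0 x

-- ===== PORT B =====
-- Source B: exactly one character and it lies in 'a'..'z' → ord - 97, anything else → -1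
-- (the len(x)==1 test and the 'a' <= x <= 'z' comparison are the single-char match on the char list).
def mn_alt (x : String) : Int :=
  match x.toList with
  | [c] => if 'a' ≤ c ∧ c ≤ 'z' then (c.toNat : Int) - 97 else -1
  | _ => -1

-- ===== PRECONDITION & SPEC =====
def Spec_mn (x : String) (out : Int) : Prop := out = mn_alt x
instance (x : String) (out : Int) : Decidable (Spec_mn x out) := by unfold Spec_mn; infer_instance

-- ===== CLAIM (what is proved, stated in full; the proofs are below) =====
def Claim_equal_mn : Prop := ∀ (x : String), Dom_mn x → Spec_mn x (mn x)

-- ===== LEMMAS AND PROOFS =====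

theorem ofList_inj (a b : List Char) : (String.ofList a = String.ofList b) ↔ a = b :=
  ⟨fun h => by simpa using congrArg String.toList h, fun h => h ▸ rfl⟩

theorem char_le_iff (a c : Char) : (a ≤ c) ↔ (a.toNat ≤ c.toNat) := by
  rw [Char.le_def]; exact UInt32.le_iff_toNat_le

-- A's loop on a one-character argument is an index search in its letter list.
theorem mnGo_single (ls : List Char) (c0 : Int) (ch : Char) :
    mnGo ls c0 (String.ofList [ch]) =
      (match ls.idxOf? ch with | some i => c0 + i | none => -1) := by
  induction ls generalizing c0 with
  | nil => rfl
  | cons i rest ih =>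
    by_cases h : i = ch
    · simp [mnGo, h, List.idxOf?_cons]
    · simp only [mnGo, ofList_inj, List.cons.injEq, and_true, ih, List.idxOf?_cons,
        beq_iff_eq, h, if_false]
      cases hr : rest.idxOf? ch <;> simp <;> ring

theorem alpha_eq : "abcdefghijklmnopqrstuvwxyz".toList = (['a','b','c','d','e','f','g','h','i','j','k','l','m','n','o','p','q','r','s','t','u','v','w','x','y','z'] : List Char) := rfl

theorem mem_alpha_range (ch : Char) (h : ch ∈ (['a','b','c','d','e','f','g','h','i','j','k','l','m','n','o','p','q','r','s','t','u','v','w','x','y','z'] : List Char)) :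
    97 ≤ ch.toNat ∧ ch.toNat ≤ 122 := by
  simp only [List.mem_cons, List.not_mem_nil, or_false] at h
  rcases h with rfl|rfl|rfl|rfl|rfl|rfl|rfl|rfl|rfl|rfl|rfl|rfl|rfl|rfl|rfl|rfl|rfl|rfl|rfl|rfl|rfl|rfl|rfl|rfl|rfl|rfl <;> decide

theorem idxOf_alpha (ch : Char) :
    (['a','b','c','d','e','f','g','h','i','j','k','l','m','n','o','p','q','r','s','t','u','v','w','x','y','z'] : List Char).idxOf? ch
      = (if 97 ≤ ch.toNat ∧ ch.toNat ≤ 122 then some (ch.toNat - 97) else none) := by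
  by_cases hr : 97 ≤ ch.toNat ∧ ch.toNat ≤ 122
  · rw [if_pos hr]
    obtain ⟨h1, h2⟩ := hr
    obtain ⟨n, hn1, hn2, hn⟩ : ∃ n, 97 ≤ n ∧ n ≤ 122 ∧ ch.toNat = n := ⟨ch.toNat, h1, h2, rfl⟩
    rw [hn, ← Char.ofNat_toNat ch, hn]
    interval_cases n <;> decide
  · rw [if_neg hr]
    exact List.idxOf?_eq_none_iff.mpr (fun hmem => hr (mem_alpha_range ch hmem))

theorem key (l : List Char) :
    mnGo "abcdefghijklmnopqrstuvwxyz".toList 0 (String.ofList l) = mn_alt (String.ofList l) := by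
  rw [alpha_eq]
  match l with
  | [] => decide
  | a :: b :: rest =>
      simp only [mnGo, ofList_inj]
      simp [mn_alt]
  | [c] =>
      rw [mnGo_single, idxOf_alpha]
      have hb : ('a' ≤ c ∧ c ≤ 'z') ↔ (97 ≤ c.toNat ∧ c.toNat ≤ 122) := by
        simp only [char_le_iff, show ('a').toNat = 97 from rfl, show ('z').toNat = 122 from rfl]
      simp only [mn_alt, String.toList_ofList]
      by_cases hr : 97 ≤ c.toNat ∧ c.toNat ≤ 122
      · rw [if_pos hr, if_pos (hb.mpr hr)]
        show (0 : Int) + ((c.toNat - 97 : Nat) : Int) = (c.toNat : Int) - 97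
        omega
      · rw [if_neg hr, if_neg (fun hx => hr (hb.mp hx))]

-- ===== VERDICT (by name: the statement is the Claim_ definition above) =====
theorem mn_spec : Claim_equal_mn := by
  intro x _
  unfold Spec_mn mn
  have hx : String.ofList x.toList = x := by simp
  rw [← hx]
  exact key x.toList
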